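-- pv_equiv track=rewrite | github.com/daniel-reich/turbo-robot | srEFhCNueikMKs3oT_13.py | consecutive_sum
-- ===== SOURCE A (Python) =====
-- def consecutive_sum(n):
--     for i in range(1, n-1):
--         tot = i
--         while True:
--             i += 1
--             tot += i
--             if tot == n:
--                 return True
--             if tot > n:
--                 break
--     return False
-- ===== SOURCE B (Python) =====
-- def consecutive_sum(n):
--     # n is a sum of >=2 consecutive positive integers iff n > 0 and
--     # the odd part of n exceeds 1 (i.e. n is not a power of two).
--     if n <= 0:
--         return False
--     m = n
--     while m % 2 == 0:
--         m //= 2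
--     return m > 1
-- ===== Notes on version B (the rewrite author's own statement) =====
-- stated objective: faster
-- what changed: Replaced the nested enumeration of all consecutive-run sums by the classical polite-number criterion: strip factors of 2 and test whether the odd part of n exceeds 1.
import Mathlib
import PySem

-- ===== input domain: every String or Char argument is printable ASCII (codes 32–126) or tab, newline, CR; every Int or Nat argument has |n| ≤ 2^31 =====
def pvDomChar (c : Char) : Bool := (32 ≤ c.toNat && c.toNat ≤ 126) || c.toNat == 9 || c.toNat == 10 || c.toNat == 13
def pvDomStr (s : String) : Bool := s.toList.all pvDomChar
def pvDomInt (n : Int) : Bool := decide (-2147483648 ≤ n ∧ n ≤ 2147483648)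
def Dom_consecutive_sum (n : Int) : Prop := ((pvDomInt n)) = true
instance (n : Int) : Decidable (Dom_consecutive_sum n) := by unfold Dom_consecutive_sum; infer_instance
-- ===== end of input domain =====

-- B changes the algorithm: instead of enumerating every run of consecutive integers,
-- it strips factors of 2 and tests whether the odd part of n exceeds 1 (objective: faster).

-- ===== PORT A =====
-- inner `while True` loop of A: state (i, tot); the proof argument 1 ≤ i only
-- justifies termination and holds throughout A's execution.
def pvInnerA (n : Int) (i tot : Int) (hi : 1 ≤ i) : Bool :=
  if tot + (i + 1) = n then true
  else if tot + (i + 1) > n then false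
  else pvInnerA n (i + 1) (tot + (i + 1)) (by omega)
termination_by (n - tot).toNat
decreasing_by omega

-- outer `for i in range(1, n-1)` loop of A as a counter loop
def pvOuterA (n : Int) (i : Int) (hi : 1 ≤ i) : Bool :=
  if i < n - 1 then
    if pvInnerA n i i hi then true else pvOuterA n (i + 1) (by omega)
  else false
termination_by (n - 1 - i).toNat
decreasing_by omega

def consecutive_sum (n : Int) : Bool := pvOuterA n 1 (by norm_num)

-- ===== PORT B =====
-- `while m % 2 == 0: m //= 2` of B; the `0 < m` conjunct is a totality guard only
-- (B's loop is only ever entered with m = n > 0, where the guard is true).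
def pvOddPart (m : Int) : Int :=
  if 0 < m ∧ PySem.Int.mod m 2 = 0 then pvOddPart (PySem.Int.floordiv m 2) else m
termination_by m.toNat
decreasing_by
  rename_i h
  have h1 : PySem.Int.floordiv m 2 = m / 2 := PySem.Int.floordiv_eq_ediv_of_pos (by omega)
  have h2 : PySem.Int.mod m 2 = m % 2 := PySem.Int.mod_eq_emod_of_pos (by omega)
  omega

def consecutive_sum_alt (n : Int) : Bool :=
  if n ≤ 0 then false
  else decide (1 < pvOddPart n)

-- ===== PRECONDITION & SPEC =====
def Spec_consecutive_sum (n : Int) (out : Bool) : Prop := out = consecutive_sum_alt n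
instance (n : Int) (out : Bool) : Decidable (Spec_consecutive_sum n out) := by unfold Spec_consecutive_sum; infer_instance

-- ===== CLAIM (what is proved, stated in full; the proofs are below) =====
def Claim_equal_consecutive_sum : Prop := ∀ (n : Int), Dom_consecutive_sum n → Spec_consecutive_sum n (consecutive_sum n)

-- ===== LEMMAS AND PROOFS =====

-- `pvRep n j k` : n = j + (j+1) + … + (j+k), doubled to avoid division
def pvRep (n j k : Int) : Prop := 1 ≤ j ∧ 1 ≤ k ∧ 2*j + 2*k*j + k*(k+1) = 2*n

-- inner loop characterisation: true iff some extension of the running sum hits n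
theorem pvInnerA_iff (n i tot : Int) (hi : 1 ≤ i) :
    pvInnerA n i tot hi = true ↔ ∃ k : Int, 1 ≤ k ∧ 2*tot + 2*k*i + k*(k+1) = 2*n := by
  induction i, tot, hi using pvInnerA.induct n with
  | case1 i tot hi h =>
    rw [pvInnerA]; simp [h]
    exact ⟨1, by norm_num, by linarith⟩
  | case2 i tot hi h1 h2 =>
    rw [pvInnerA]; simp [h1, h2]
    rintro k hk he
    nlinarith [mul_nonneg (by linarith : (0:ℤ) ≤ k - 1) (by linarith : (0:ℤ) ≤ i),
               mul_nonneg (by linarith : (0:ℤ) ≤ k - 1) (by linarith : (0:ℤ) ≤ k + 2)]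
  | case3 i tot hi h1 h2 ih =>
    rw [pvInnerA]; simp [h1, h2]
    rw [ih]
    constructor
    · rintro ⟨k', hk', he⟩
      exact ⟨k' + 1, by linarith, by linear_combination he⟩
    · rintro ⟨k, hk, he⟩
      rcases eq_or_lt_of_le hk with rfl | h
      · exact absurd (by linarith) h1
      · exact ⟨k - 1, by linarith, by linear_combination he⟩

-- outer loop characterisation
theorem pvOuterA_iff (n i : Int) (hi : 1 ≤ i) :
    pvOuterA n i hi = true ↔ ∃ j k : Int, i ≤ j ∧ pvRep n j k := by
  induction i, hi using pvOuterA.induct n with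
  | case1 i hi hlt hb =>
    rw [pvOuterA, if_pos hlt, if_pos hb]
    obtain ⟨k, h1k, he⟩ := (pvInnerA_iff n i i hi).mp hb
    exact iff_of_true rfl ⟨i, k, le_refl i, hi, h1k, he⟩
  | case2 i hi hlt hb ih =>
    rw [pvOuterA, if_pos hlt, if_neg hb]
    rw [ih]
    constructor
    · rintro ⟨j, k, hij, hrep⟩; exact ⟨j, k, by linarith, hrep⟩
    · rintro ⟨j, k, hij, h1j, h1k, he⟩
      rcases eq_or_lt_of_le hij with rfl | h
      · exact absurd ((pvInnerA_iff n i i hi).mpr ⟨k, h1k, he⟩) hb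
      · exact ⟨j, k, by linarith, h1j, h1k, he⟩
  | case3 i hi hge =>
    rw [pvOuterA, if_neg hge]
    simp only [Bool.false_eq_true, false_iff]
    rintro ⟨j, k, hij, h1j, h1k, he⟩
    nlinarith [mul_nonneg (by linarith : (0:ℤ) ≤ k - 1) (by linarith : (0:ℤ) ≤ j),
               mul_nonneg (by linarith : (0:ℤ) ≤ k - 1) (by linarith : (0:ℤ) ≤ k + 2)]

-- odd-part loop characterisation
theorem pvOddPart_spec : ∀ m : Int, 0 < m →
    ∃ e : ℕ, m = 2 ^ e * pvOddPart m ∧ pvOddPart m % 2 = 1 ∧ 0 < pvOddPart m := by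
  intro m
  induction m using pvOddPart.induct with
  | case1 m h ih =>
    intro hm
    have hd : PySem.Int.floordiv m 2 = m / 2 := PySem.Int.floordiv_eq_ediv_of_pos (by omega)
    have hmod : PySem.Int.mod m 2 = m % 2 := PySem.Int.mod_eq_emod_of_pos (by omega)
    obtain ⟨e, h1, h2, h3⟩ := ih (by omega)
    rw [pvOddPart, if_pos h]
    refine ⟨e + 1, ?_, h2, h3⟩
    have key : 2 * PySem.Int.floordiv m 2 = m := by omega
    rw [pow_succ]
    linear_combination 2 * h1 - key
  | case2 m h =>
    intro hm
    have hmod : PySem.Int.mod m 2 = m % 2 := PySem.Int.mod_eq_emod_of_pos (by omega)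
    rw [pvOddPart, if_neg h]
    exact ⟨0, by norm_num, by omega, hm⟩

-- the polite-number theorem: a representation exists iff the odd part exceeds 1
theorem pvRep_iff (n : Int) (hn : 0 < n) :
    (∃ j k : Int, pvRep n j k) ↔ 1 < pvOddPart n := by
  obtain ⟨e, hne, hodd, hcpos⟩ := pvOddPart_spec n hn
  set c := pvOddPart n with hc
  constructor
  · rintro ⟨j, k, h1j, h1k, he⟩
    by_contra hle
    have hc1 : c = 1 := by omega
    rw [hc1, mul_one] at hne
    -- n = 2^e; contradiction: 2n would have an odd factor ≥ 3
    have hab : (k + 1) * (2*j + k) = 2 ^ (e + 1) := by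
      rw [pow_succ]; rw [hne] at he; linear_combination he
    have ha2 : 2 ≤ k + 1 := by linarith
    have hb3 : 3 ≤ 2*j + k := by linarith
    set A : ℕ := (k + 1).toNat with hA
    set B : ℕ := (2*j + k).toNat with hB
    have hAi : (A : ℤ) = k + 1 := Int.toNat_of_nonneg (by linarith)
    have hBi : (B : ℤ) = 2*j + k := Int.toNat_of_nonneg (by linarith)
    have hABn : A * B = 2 ^ (e + 1) := by
      have hcast : ((A * B : ℕ) : ℤ) = ((2 ^ (e + 1) : ℕ) : ℤ) := by
        push_cast
        rw [hAi, hBi]; exact hab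
      exact_mod_cast hcast
    have hsum : (A : ℤ) + B = 2*(j + k) + 1 := by rw [hAi, hBi]; ring
    have hA2 : 2 ≤ A := by omega
    have hB3 : 3 ≤ B := by omega
    have hparity : (A + B) % 2 = 1 := by omega
    have hodd_dvd : ∀ d : ℕ, d % 2 = 1 → d ∣ 2 ^ (e + 1) → d = 1 := by
      intro d hd hdvd
      have hcop : Nat.Coprime d 2 := by
        rcases Nat.coprime_or_dvd_of_prime Nat.prime_two d with h | h
        · exact h.symm
        · omega
      exact Nat.Coprime.eq_one_of_dvd (hcop.pow_right _) hdvd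
    rcases Nat.even_or_odd A with hAe | hAo
    · have hAe' : A % 2 = 0 := Nat.even_iff.mp hAe
      have hBo : B % 2 = 1 := by omega
      have : B = 1 := hodd_dvd B hBo ⟨A, by rw [← hABn]; ring⟩
      omega
    · have hAo' : A % 2 = 1 := Nat.odd_iff.mp hAo
      have : A = 1 := hodd_dvd A hAo' ⟨B, hABn.symm⟩
      omega
  · intro hc1
    -- n = 2^e * c with c odd ≥ 3: pair the factors 2^(e+1) and c of 2n
    set p : ℤ := 2 ^ (e + 1) with hp
    have hpe : p = 2 * 2 ^ e := by rw [hp, pow_succ]; ring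
    have h2e : (1:ℤ) ≤ 2 ^ e := one_le_pow₀ (by norm_num)
    have hp2 : 2 ≤ p := by omega
    have hpeven : p % 2 = 0 := by omega
    have hq3 : 3 ≤ c := by omega
    have h2n : p * c = 2 * n := by rw [hpe, hne]; ring
    rcases lt_or_gt_of_ne (show p ≠ c by omega) with hlt | hgt
    · -- p < c : length p run, k = p - 1, j = (c - p + 1)/2
      obtain ⟨j, hj⟩ : ∃ t : ℤ, c - p + 1 = 2 * t := ⟨(c - p + 1) / 2, by omega⟩
      exact ⟨j, p - 1, by omega, by omega, by linear_combination h2n - p * hj⟩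
    · -- c < p : length c run, k = c - 1, j = (p - c + 1)/2
      obtain ⟨j, hj⟩ : ∃ t : ℤ, p - c + 1 = 2 * t := ⟨(p - c + 1) / 2, by omega⟩
      exact ⟨j, c - 1, by omega, by omega, by linear_combination h2n - c * hj⟩

-- ===== VERDICT (by name: the statement is the Claim_ definition above) =====
theorem consecutive_sum_spec : Claim_equal_consecutive_sum := by
  intro n _
  unfold Spec_consecutive_sum consecutive_sum consecutive_sum_alt
  by_cases hn : n ≤ 0
  · rw [if_pos hn, pvOuterA]
    simp only [if_neg (show ¬ (1 < n - 1) by omega)]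
  · rw [if_neg hn]
    have h0 : 0 < n := by omega
    rw [Bool.eq_iff_iff, pvOuterA_iff, decide_eq_true_iff]
    rw [show (∃ j k : Int, 1 ≤ j ∧ pvRep n j k) ↔ ∃ j k : Int, pvRep n j k from
      ⟨fun ⟨j, k, _, h⟩ => ⟨j, k, h⟩, fun ⟨j, k, h⟩ => ⟨j, k, h.1, h⟩⟩]
    exact pvRep_iff n h0
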